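-- pv_equiv track=rewrite | github.com/MansiDiego/laboratorioDePython | guia7.py | sumaVocal
-- ===== SOURCE A (Python) =====
-- def vocal(palabra: str)->bool:##ARME PRIMERO UNA FUNCION QUE DETECTA VOCALES
--     vocales = "AEIOUaeiou"
--     for letra in palabra:
--         if letra in vocales:
--             return True
--     return False
--
-- def sumaVocal(palabra:str)->int:
--     sumaVocales = set()
--     i = 0
--     while i < len(palabra):
--         if vocal(palabra[i]):
--             sumaVocales.add(palabra[i].lower())
--         i = i + 1 #si justo en la posición i no habia una vocal va a pasar a la siguiente, y así sucesivamente, hasta el ultimo elemento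
--     return len(sumaVocales) >= 3
-- ===== SOURCE B (Python) =====
-- def sumaVocal(palabra: str) -> int:
--     w = palabra.lower()
--     return sum(1 for v in "aeiou" if v in w) >= 3
-- ===== Notes on version B (the rewrite author's own statement) =====
-- stated objective: faster
-- what changed: Inverts the traversal: instead of scanning the word character by character with a vowel helper and accumulating a set of lowered vowels, B lowercases the word once and loops over the five vowels, counting how many occur in the word via substring membership, with no set at all.
import Mathlib
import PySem

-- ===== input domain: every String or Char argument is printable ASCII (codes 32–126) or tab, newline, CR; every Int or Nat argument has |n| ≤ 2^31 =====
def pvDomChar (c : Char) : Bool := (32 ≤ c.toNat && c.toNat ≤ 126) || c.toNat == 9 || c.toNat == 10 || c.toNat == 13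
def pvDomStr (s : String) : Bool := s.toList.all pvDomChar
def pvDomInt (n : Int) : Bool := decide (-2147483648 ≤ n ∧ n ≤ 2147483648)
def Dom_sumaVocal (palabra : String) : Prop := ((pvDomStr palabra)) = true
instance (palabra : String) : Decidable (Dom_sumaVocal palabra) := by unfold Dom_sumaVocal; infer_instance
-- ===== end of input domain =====

-- B inverts the traversal: instead of scanning the word and accumulating a set of lowered vowels,
-- it lowercases the word once and counts, over the five vowels, which occur in it (no set at all).

-- ===== PORT A =====
-- vocales = "AEIOUaeiou" as its character list
def vocalesA : List Char := ['A','E','I','O','U','a','e','i','o','u']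

-- helper 'vocal': scan with early return True on the first vowel
def vocal : List Char → Bool
  | [] => false
  | letra :: rest => if vocalesA.contains letra then true else vocal rest

-- the while-loop over positions i, adding palabra[i].lower() (a 1-char string = List Char) to the set
def sumaVocalLoop : List Char → PySem.Set (List Char) → PySem.Set (List Char)
  | [], s => s
  | c :: rest, s =>
      sumaVocalLoop rest (if vocal [c] then PySem.Set.add s (PySem.Chars.lower [c]) else s)

def sumaVocal (palabra : String) : Bool :=
  decide (3 ≤ PySem.Set.len (sumaVocalLoop palabra.toList PySem.Set.empty))

-- ===== PORT B =====
-- w = palabra.lower(); sum(1 for v in "aeiou" if v in w) >= 3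
-- 'v in w' (1-char substring test) is PySem.Chars.isIn [v] w; the 0/1-sum of the generator is countP.
def sumaVocal_alt (palabra : String) : Bool :=
  let w := (PySem.Str.lower palabra).toList
  decide (3 ≤ ((((['a','e','i','o','u'] : List Char).countP
      (fun v => PySem.Chars.isIn [v] w)) : Int)))

-- ===== PRECONDITION & SPEC =====
def Spec_sumaVocal (palabra : String) (out : Bool) : Prop := out = sumaVocal_alt palabra
instance (palabra : String) (out : Bool) : Decidable (Spec_sumaVocal palabra out) := by unfold Spec_sumaVocal; infer_instance

-- ===== CLAIM (what is proved, stated in full; the proofs are below) =====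
def Claim_equal_sumaVocal : Prop := ∀ (palabra : String), Dom_sumaVocal palabra → Spec_sumaVocal palabra (sumaVocal palabra)

-- ===== LEMMAS AND PROOFS =====

def vowels5 : List Char := ['a','e','i','o','u']

lemma char_eq_of_toNat (c d : Char) (h : c.toNat = d.toNat) : c = d := by
  have h2 : Char.ofNat c.toNat = Char.ofNat d.toNat := by rw [h]
  rwa [Char.ofNat_toNat, Char.ofNat_toNat] at h2

-- a character is one of A's ten vowels iff its Python .lower() is one of B's five
lemma vowel_iff (c : Char) :
    (c ∈ vocalesA) ↔ (PySem.Chars.lowerChar c ∈ vowels5) := by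
  constructor
  · intro h
    fin_cases h <;> decide
  · intro h
    unfold PySem.Chars.lowerChar PySem.Chars.isupper at h
    split at h
    · rename_i hu
      simp only [Bool.and_eq_true, decide_eq_true_eq] at hu
      have hge : 65 ≤ c.toNat := Char.le_def.mp hu.1
      have hle : c.toNat ≤ 90 := Char.le_def.mp hu.2
      have hv : (c.toNat + 32).isValidChar := Or.inl (by omega)
      have htn : (Char.ofNat (c.toNat + 32)).toNat = c.toNat + 32 := by
        rw [Char.toNat_ofNat, if_pos hv]
      simp only [vowels5, List.mem_cons, List.not_mem_nil, or_false] at h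
      obtain h|h|h|h|h := h
      · have h2 := congrArg Char.toNat h
        rw [htn, show Char.toNat 'a' = 97 from by decide] at h2
        have hc : c = 'A' := char_eq_of_toNat c 'A' (by rw [show Char.toNat 'A' = 65 from by decide]; omega)
        rw [hc]; decide
      · have h2 := congrArg Char.toNat h
        rw [htn, show Char.toNat 'e' = 101 from by decide] at h2
        have hc : c = 'E' := char_eq_of_toNat c 'E' (by rw [show Char.toNat 'E' = 69 from by decide]; omega)
        rw [hc]; decide
      · have h2 := congrArg Char.toNat h
        rw [htn, show Char.toNat 'i' = 105 from by decide] at h2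
        have hc : c = 'I' := char_eq_of_toNat c 'I' (by rw [show Char.toNat 'I' = 73 from by decide]; omega)
        rw [hc]; decide
      · have h2 := congrArg Char.toNat h
        rw [htn, show Char.toNat 'o' = 111 from by decide] at h2
        have hc : c = 'O' := char_eq_of_toNat c 'O' (by rw [show Char.toNat 'O' = 79 from by decide]; omega)
        rw [hc]; decide
      · have h2 := congrArg Char.toNat h
        rw [htn, show Char.toNat 'u' = 117 from by decide] at h2
        have hc : c = 'U' := char_eq_of_toNat c 'U' (by rw [show Char.toNat 'U' = 85 from by decide]; omega)
        rw [hc]; decide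
    · simp only [vowels5, List.mem_cons, List.not_mem_nil, or_false] at h
      obtain h|h|h|h|h := h <;> (rw [h]; decide)

lemma vocal_singleton (c : Char) : vocal [c] = vocalesA.contains c := by
  simp [vocal]

lemma mem_sumaVocalLoop (cs : List Char) (s : PySem.Set (List Char)) (y : List Char) :
    y ∈ sumaVocalLoop cs s ↔ y ∈ s ∨ ∃ c ∈ cs, vocal [c] = true ∧ y = PySem.Chars.lower [c] := by
  induction cs generalizing s with
  | nil => simp [sumaVocalLoop]
  | cons c rest ih =>
      simp only [sumaVocalLoop]
      rw [ih]
      by_cases h : vocal [c] = true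
      · simp only [h, if_true, PySem.Set.mem_add, List.mem_cons]
        constructor
        · rintro (((hy | hy) | ⟨d, hd, hv, hy⟩))
          · exact Or.inl hy
          · exact Or.inr ⟨c, Or.inl rfl, h, hy⟩
          · exact Or.inr ⟨d, Or.inr hd, hv, hy⟩
        · rintro (hy | ⟨d, (rfl | hd), hv, hy⟩)
          · exact Or.inl (Or.inl hy)
          · exact Or.inl (Or.inr hy)
          · exact Or.inr ⟨d, hd, hv, hy⟩
      · simp only [h, if_false, Bool.false_eq_true, List.mem_cons]
        constructor
        · rintro (hy | ⟨d, hd, hv, hy⟩)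
          · exact Or.inl hy
          · exact Or.inr ⟨d, Or.inr hd, hv, hy⟩
        · rintro (hy | ⟨d, (rfl | hd), hv, hy⟩)
          · exact Or.inl hy
          · exact absurd hv h
          · exact Or.inr ⟨d, hd, hv, hy⟩

lemma nodup_sumaVocalLoop (cs : List Char) (s : PySem.Set (List Char)) (hs : s.Nodup) :
    (sumaVocalLoop cs s).Nodup := by
  induction cs generalizing s with
  | nil => exact hs
  | cons c rest ih =>
      simp only [sumaVocalLoop]
      split
      · exact ih _ (PySem.Set.nodup_add _ _ hs)
      · exact ih _ hs

-- membership of y in A's final set, phrased through B's quantities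
lemma mem_loop_iff (cs : List Char) (y : List Char) :
    y ∈ sumaVocalLoop cs PySem.Set.empty ↔
      ∃ v ∈ vowels5, v ∈ PySem.Chars.lower cs ∧ y = [v] := by
  rw [mem_sumaVocalLoop]
  constructor
  · rintro (h | ⟨c, hc, hv, hy⟩)
    · simp [PySem.Set.empty] at h
    · refine ⟨PySem.Chars.lowerChar c, ?_, ?_, by simpa [PySem.Chars.lower] using hy⟩
      · rw [← vowel_iff]
        rw [vocal_singleton] at hv
        simpa using hv
      · simp only [PySem.Chars.lower, List.mem_map]
        exact ⟨c, hc, rfl⟩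
  · rintro ⟨v, hv5, hvw, hy⟩
    simp only [PySem.Chars.lower, List.mem_map] at hvw
    obtain ⟨c, hc, hlv⟩ := hvw
    right
    refine ⟨c, hc, ?_, by simp [PySem.Chars.lower, hlv, hy]⟩
    rw [vocal_singleton]
    have : c ∈ vocalesA := (vowel_iff c).mpr (by rw [hlv]; exact hv5)
    simpa using this

-- A's set size equals B's count of vowels present in the lowered word
lemma len_loop_eq_countP (cs : List Char) :
    (sumaVocalLoop cs PySem.Set.empty).length =
      vowels5.countP (fun v => PySem.Chars.isIn [v] (PySem.Chars.lower cs)) := by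
  have hsub : ∀ v : Char, PySem.Chars.isIn [v] (PySem.Chars.lower cs) = true ↔
      v ∈ PySem.Chars.lower cs := by
    intro v
    rw [PySem.Chars.isIn_iff_infix]
    constructor
    · intro h; exact h.subset (by simp)
    · intro h; exact (List.singleton_infix_iff v (PySem.Chars.lower cs)).mpr h
  set F := vowels5.filter (fun v => decide (v ∈ PySem.Chars.lower cs)) with hF
  have hnF : F.Nodup := List.Nodup.filter _ (by decide)
  have hnFm : (F.map (fun v => [v])).Nodup :=
    hnF.map (fun a b h => by simpa using h)
  have hnA : (sumaVocalLoop cs PySem.Set.empty).Nodup :=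
    nodup_sumaVocalLoop cs _ (by simp [PySem.Set.empty])
  have hperm : (sumaVocalLoop cs PySem.Set.empty).Perm (F.map (fun v => [v])) := by
    rw [List.perm_ext_iff_of_nodup hnA hnFm]
    intro y
    rw [mem_loop_iff]
    simp only [hF, List.mem_map, List.mem_filter, decide_eq_true_eq]
    constructor
    · rintro ⟨v, hv5, hvw, hy⟩; exact ⟨v, ⟨hv5, hvw⟩, hy.symm⟩
    · rintro ⟨v, ⟨hv5, hvw⟩, hy⟩; exact ⟨v, hv5, hvw, hy.symm⟩
  rw [hperm.length_eq, List.length_map, hF]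
  rw [List.countP_eq_length_filter]
  congr 1
  apply List.filter_congr
  intro v _
  cases h : PySem.Chars.isIn [v] (PySem.Chars.lower cs) with
  | false =>
      have hm : ¬ v ∈ PySem.Chars.lower cs := fun hv => by
        rw [(hsub v).mpr hv] at h; simp at h
      simp [hm]
  | true => simp [(hsub v).mp h]

-- ===== VERDICT (by name: the statement is the Claim_ definition above) =====
theorem sumaVocal_spec : Claim_equal_sumaVocal := by
  intro palabra _
  unfold Spec_sumaVocal sumaVocal sumaVocal_alt
  have hlw : (PySem.Str.lower palabra).toList = PySem.Chars.lower palabra.toList := by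
    simp [PySem.Str.toList_lower]
  simp only [hlw]
  rw [show PySem.Set.len (sumaVocalLoop palabra.toList PySem.Set.empty) =
        ((sumaVocalLoop palabra.toList PySem.Set.empty).length : Int) from rfl]
  rw [len_loop_eq_countP]
  rfl
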